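-- pv_equiv track=rewrite | github.com/DiamondGotCat/NewCode | main.py | int_to_crypttext
-- ===== SOURCE A (Python) =====
-- CHARSET = 'ABCDEFGHJKLMNPQRSTUVWXYZ23456789'
--
-- BASE = len(CHARSET)  # 32
--
-- def int_to_crypttext(num):
--     """
--     Convert an integer to a NewCode string.
--
--     Args:
--         num (int): The integer to convert.
--
--     Returns:
--         str: The NewCode string.
--     """
--     if num == 0:
--         return CHARSET[0]
--
--     chars = []
--     while num > 0:
--         rem = num % BASE
--         chars.append(CHARSET[rem])
--         num = num // BASE
--
--     # Reverse to make most significant digits first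
--     chars = chars[::-1]
--
--     # Group into 4-character segments from most significant first, pad with 'A's
--     grouped = []
--     for i in range(0, len(chars), 4):
--         group = ''.join(chars[i:i+4])
--         if len(group) < 4:
--             group = group.ljust(4, 'A')  # Pad with 'A's to make 4 characters
--         grouped.append(group)
--
--     # Reverse each group for better readability
--     grouped = [group[::-1] for group in grouped]
--
--     return '-'.join(grouped)
-- ===== SOURCE B (Python) =====
-- CHARSET = 'ABCDEFGHJKLMNPQRSTUVWXYZ23456789'
--
-- BASE = len(CHARSET)  # 32
--
-- def int_to_crypttext(num):
--     if num == 0: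
--         return CHARSET[0]
--
--     def msb(n):
--         # most-significant-digit-first base-32 expansion; '' for n <= 0
--         return '' if n <= 0 else msb(n // BASE) + CHARSET[n % BASE]
--
--     digits = msb(num)
--     # right-pad to a multiple of 4 (only the least significant group is short)
--     digits += 'A' * (-len(digits) % 4)
--
--     groups = []
--     while digits:
--         groups.append(digits[:4][::-1])
--         digits = digits[4:]
--     return '-'.join(groups)
-- ===== Notes on version B (the rewrite author's own statement) =====
-- stated objective: simpler
-- what changed: Digits are produced most-significant-first by a recursive helper (no LSB stack + reverse), and the whole digit string is right-padded to a multiple of 4 once, then split into 4-char reversed chunks by a list-consuming loop instead of an index loop with per-group ljust.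
import Mathlib
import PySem

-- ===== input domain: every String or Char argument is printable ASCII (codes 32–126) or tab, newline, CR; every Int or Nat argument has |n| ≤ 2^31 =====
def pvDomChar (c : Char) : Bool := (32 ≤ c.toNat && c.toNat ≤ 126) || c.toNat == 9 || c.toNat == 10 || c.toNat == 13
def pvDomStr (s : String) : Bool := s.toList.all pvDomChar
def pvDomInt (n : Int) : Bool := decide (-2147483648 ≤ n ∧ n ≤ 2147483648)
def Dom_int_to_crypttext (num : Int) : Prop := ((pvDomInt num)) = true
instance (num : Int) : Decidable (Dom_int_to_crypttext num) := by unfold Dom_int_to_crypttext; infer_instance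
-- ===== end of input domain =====

-- B builds the base-32 digits most-significant-first with a recursive helper and
-- pads/chunks the digit string in one pass (simpler decomposition, same cost).

def pvCharset : List Char := "ABCDEFGHJKLMNPQRSTUVWXYZ23456789".toList

-- termination helper for the division loops (cited by decreasing_by)
theorem pv_fdiv_lt (n : Int) (h : 0 < n) :
    (PySem.Int.floordiv n 32).toNat < n.toNat := by
  rw [PySem.Int.floordiv_eq_ediv_of_pos (by omega)]
  omega

-- ===== PORT A =====

-- the `while num > 0` loop: digits least-significant-first
def pvDigitsA (num : Int) : List Char :=
  if 0 < num then
    PySem.List.pyGetD pvCharset (PySem.Int.mod num 32) ' ' ::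
      pvDigitsA (PySem.Int.floordiv num 32)
  else []
termination_by num.toNat
decreasing_by exact pv_fdiv_lt _ (by omega)

-- the `for i in range(0, len(chars), 4)` loop; ljust(4,'A') ported by hand (exact: pad on the right)
def pvGroupA (chars : List Char) (i : Nat) : List (List Char) :=
  if i < chars.length then
    let group := PySem.List.slice chars (some (i : Int)) (some ((i : Int) + 4))
    let group := if group.length < 4 then group ++ List.replicate (4 - group.length) 'A' else group
    group :: pvGroupA chars (i + 4)
  else []
termination_by chars.length - i

def int_to_crypttext (num : Int) : String :=
  if num == 0 then String.ofList [PySem.List.pyGetD pvCharset 0 ' ']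
  else
    let chars := (pvDigitsA num).reverse          -- chars[::-1]
    let grouped := pvGroupA chars 0
    let grouped := grouped.map List.reverse       -- group[::-1]
    String.ofList (PySem.Chars.join ['-'] grouped)

-- ===== PORT B =====

-- msb(n): most-significant-first digits, '' for n <= 0
def pvDigitsB (n : Int) : List Char :=
  if n ≤ 0 then []
  else pvDigitsB (PySem.Int.floordiv n 32) ++
       [PySem.List.pyGetD pvCharset (PySem.Int.mod n 32) ' ']
termination_by n.toNat
decreasing_by exact pv_fdiv_lt _ (by omega)

-- the `while digits:` loop: digits[:4][::-1] consed, continue on digits[4:]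
def pvChunksB (l : List Char) : List (List Char) :=
  if l = [] then []
  else (PySem.List.slice l none (some 4)).reverse ::
       pvChunksB (PySem.List.slice l (some 4) none)
termination_by l.length
decreasing_by
  rename_i h
  rw [PySem.List.slice_from _ (by norm_num)]
  have := List.length_pos_iff.mpr h
  simp
  omega

def int_to_crypttext_alt (num : Int) : String :=
  if num == 0 then String.ofList [PySem.List.pyGetD pvCharset 0 ' ']
  else
    let digits := pvDigitsB num
    let digits := digits ++
      List.replicate (PySem.Int.mod (-(digits.length : Int)) 4).toNat 'A'  -- 'A' * (-len % 4)
    String.ofList (PySem.Chars.join ['-'] (pvChunksB digits))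

-- ===== PRECONDITION & SPEC =====
def Spec_int_to_crypttext (num : Int) (out : String) : Prop := out = int_to_crypttext_alt num
instance (num : Int) (out : String) : Decidable (Spec_int_to_crypttext num out) := by unfold Spec_int_to_crypttext; infer_instance

-- ===== CLAIM (what is proved, stated in full; the proofs are below) =====
def Claim_equal_int_to_crypttext : Prop := ∀ (num : Int), Dom_int_to_crypttext num → Spec_int_to_crypttext num (int_to_crypttext num)

-- ===== LEMMAS AND PROOFS =====

theorem pv_digits_rev (n : Int) : (pvDigitsA n).reverse = pvDigitsB n := by
  rw [pvDigitsA.eq_def, pvDigitsB.eq_def]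
  by_cases h : 0 < n
  · have := pv_fdiv_lt n h
    simp only [h, if_pos, if_neg (by omega : ¬ n ≤ 0), List.reverse_cons]
    rw [pv_digits_rev (PySem.Int.floordiv n 32)]
  · simp [h, show n ≤ 0 by omega]
termination_by n.toNat
decreasing_by exact pv_fdiv_lt _ h

theorem pv_mod_neg_eq (len : Nat) :
    (PySem.Int.mod (-(len : Int)) 4).toNat = (4 - len % 4) % 4 := by
  rw [PySem.Int.mod_eq_emod_of_pos (by omega)]
  omega

theorem pv_group_eq (l : List Char) (i : Nat) (hi : i ≤ l.length) (h4 : i % 4 = 0) :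
    (pvGroupA l i).map List.reverse =
      pvChunksB (l.drop i ++ List.replicate ((4 - l.length % 4) % 4) 'A') := by
  rw [pvGroupA.eq_def]
  by_cases h : i < l.length
  · rw [if_pos h]
    have hslice : PySem.List.slice l (some (i : Int)) (some ((i : Int) + 4)) = (l.drop i).take 4 := by
      have he : ((i : Int) + 4) = ((i + 4 : Nat) : Int) := by push_cast; ring
      rw [he, PySem.List.slice_natCast]
      congr 1; omega
    simp only [hslice, List.length_take, List.length_drop]
    rw [pvChunksB.eq_def,
        if_neg (show ¬ (l.drop i ++ List.replicate ((4 - l.length % 4) % 4) 'A' = []) by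
          intro hc
          have := congrArg List.length hc
          simp at this
          omega)]
    by_cases hbig : 4 ≤ l.length - i
    · rw [if_neg (by omega : ¬ min 4 (l.length - i) < 4), List.map_cons]
      congr 1
      · rw [PySem.List.slice_to _ (by norm_num)]
        simp only [show ((4:Int)).toNat = 4 from rfl]
        rw [List.take_append_of_le_length (by rw [List.length_drop]; omega)]
      · rw [PySem.List.slice_from _ (by norm_num)]
        simp only [show ((4:Int)).toNat = 4 from rfl]
        rw [List.drop_append_of_le_length (by rw [List.length_drop]; omega),
            List.drop_drop]
        exact pv_group_eq l (i + 4) (by omega) (by omega)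
    · have hpad : (4 - l.length % 4) % 4 = 4 - (l.length - i) := by omega
      rw [if_pos (by omega : min 4 (l.length - i) < 4), List.map_cons]
      congr 1
      · rw [PySem.List.slice_to _ (by norm_num)]
        simp only [show ((4:Int)).toNat = 4 from rfl]
        rw [List.take_of_length_le (by rw [List.length_drop]; omega),
            List.take_of_length_le (by simp [hpad]; omega)]
        congr 1
        have : 4 - min 4 (l.length - i) = (4 - l.length % 4) % 4 := by omega
        rw [this]
      · rw [pvGroupA.eq_def, if_neg (by omega)]
        rw [PySem.List.slice_from _ (by norm_num)]
        simp only [show ((4:Int)).toNat = 4 from rfl]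
        rw [List.drop_eq_nil_of_le (by simp [hpad]; omega), pvChunksB.eq_def]
        simp
  · rw [if_neg h, pvChunksB.eq_def]
    have hnil : l.drop i ++ List.replicate ((4 - l.length % 4) % 4) 'A' = [] := by
      have h1 : l.drop i = [] := List.drop_eq_nil_of_le (by omega)
      have h2 : (4 - l.length % 4) % 4 = 0 := by omega
      simp [h1, h2]
    rw [hnil]
    simp
termination_by l.length - i
decreasing_by omega

-- ===== VERDICT (by name: the statement is the Claim_ definition above) =====
theorem int_to_crypttext_spec : Claim_equal_int_to_crypttext := by
  intro num _
  unfold Spec_int_to_crypttext int_to_crypttext int_to_crypttext_alt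
  by_cases h0 : num = 0
  · simp [h0]
  · simp only [beq_iff_eq, h0]
    have hd : (pvDigitsA num).reverse = pvDigitsB num := pv_digits_rev num
    have := pv_group_eq (pvDigitsB num) 0 (by omega) (by simp)
    simp only [List.drop_zero] at this
    rw [hd, this, pv_mod_neg_eq]
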